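-- pv_equiv track=rewrite | github.com/tts-tcq-2024/build-safety-net-in-py-AbhinavLondhe8515 | Soundex.py | process_characters
-- ===== SOURCE A (Python) =====
-- def get_soundex_code(c):
--     c = c.upper()
--     mapping = {
--         'B': '1', 'F': '1', 'P': '1', 'V': '1',
--         'C': '2', 'G': '2', 'J': '2', 'K': '2', 'Q': '2', 'S': '2', 'X': '2', 'Z': '2',
--         'D': '3', 'T': '3',
--         'L': '4',
--         'M': '5', 'N': '5',
--         'R': '6'
--     }
--     return mapping.get(c, '0')  # Default to '0' for non-mapped characters
--
-- def should_add_code(code, prev_code):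
--     return code != '0' and code != prev_code
--
-- def process_character(char, prev_code):
--     code = get_soundex_code(char)
--     if should_add_code(code, prev_code):
--         return code, code
--     return '', prev_code
--
-- def process_characters(name, first_letter_code):
--     soundex = []
--     prev_code = first_letter_code
--
--     for char in name[1:]:
--         code, prev_code = process_character(char, prev_code)
--         if code:
--             soundex.append(code)
--         if len(soundex) == 3:  # Since the first letter is already included, we need only 3 more codes
--             break
--
--     return soundex
-- ===== SOURCE B (Python) =====
-- def get_soundex_code(c):
--     c = c.upper()
--     mapping = {
--         'B': '1', 'F': '1', 'P': '1', 'V': '1',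
--         'C': '2', 'G': '2', 'J': '2', 'K': '2', 'Q': '2', 'S': '2', 'X': '2', 'Z': '2',
--         'D': '3', 'T': '3',
--         'L': '4',
--         'M': '5', 'N': '5',
--         'R': '6'
--     }
--     return mapping.get(c, '0')
--
-- def process_characters(name, first_letter_code):
--     codes = [get_soundex_code(ch) for ch in name[1:]]
--     filtered = [c for c in codes if c != '0']
--     collapsed = [first_letter_code]
--     for c in filtered:
--         if c != collapsed[-1]:
--             collapsed.append(c)
--     return collapsed[1:4]
-- ===== Notes on version B (the rewrite author's own statement) =====
-- stated objective: alternative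
-- what changed: A's single stateful scan with prev_code, conditional append and early break is replaced by a pipeline: map each of name[1:] to its code, filter out '0' codes, collapse adjacent duplicates into a list seeded with first_letter_code, and return slice [1:4].
import Mathlib
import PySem

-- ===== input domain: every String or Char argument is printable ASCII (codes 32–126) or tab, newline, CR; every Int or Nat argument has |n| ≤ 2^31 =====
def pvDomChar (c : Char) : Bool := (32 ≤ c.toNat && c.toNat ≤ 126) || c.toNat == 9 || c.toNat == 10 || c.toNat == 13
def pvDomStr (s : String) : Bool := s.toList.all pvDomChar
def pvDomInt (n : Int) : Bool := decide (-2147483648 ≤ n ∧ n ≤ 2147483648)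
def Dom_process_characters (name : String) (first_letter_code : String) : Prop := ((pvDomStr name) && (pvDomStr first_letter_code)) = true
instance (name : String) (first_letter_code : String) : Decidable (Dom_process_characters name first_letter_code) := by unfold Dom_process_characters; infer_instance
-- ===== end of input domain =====

-- B replaces A's stateful scan-with-break by a pipeline: map codes over name[1:], filter out '0', collapse adjacent duplicates into a list seeded with first_letter_code, slice [1:4] (objective: alternative decomposition; equivalence is about the return value).

-- ===== PORT A =====
-- shared module helper: mapping.get(c.upper(), '0') — the dict literal ported as the chain of its cases
def get_soundex_code (c : Char) : String :=
  let u := PySem.Chars.upperChar c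
  if u = 'B' ∨ u = 'F' ∨ u = 'P' ∨ u = 'V' then "1"
  else if u = 'C' ∨ u = 'G' ∨ u = 'J' ∨ u = 'K' ∨ u = 'Q' ∨ u = 'S' ∨ u = 'X' ∨ u = 'Z' then "2"
  else if u = 'D' ∨ u = 'T' then "3"
  else if u = 'L' then "4"
  else if u = 'M' ∨ u = 'N' then "5"
  else if u = 'R' then "6"
  else "0"

def should_add_code (code prev_code : String) : Bool :=
  code ≠ "0" && code ≠ prev_code

def process_character (char : Char) (prev_code : String) : String × String :=
  let code := get_soundex_code char
  if should_add_code code prev_code then (code, code) else ("", prev_code)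

-- the for-loop over name[1:] with the early break at len(soundex) == 3
def pcLoop : List Char → List String → String → List String
  | [], soundex, _ => soundex
  | ch :: rest, soundex, prev_code =>
    let r := process_character ch prev_code
    let soundex' := if r.1 ≠ "" then soundex ++ [r.1] else soundex
    if soundex'.length = 3 then soundex' else pcLoop rest soundex' r.2

def process_characters (name : String) (first_letter_code : String) : List String :=
  pcLoop name.toList.tail [] first_letter_code   -- name[1:]

-- ===== PORT B =====
-- loop body of Source B: append c when it differs from collapsed[-1] (collapsed is never empty)
def collapseStep (acc : List String) (c : String) : List String :=
  if c ≠ acc.getLast! then acc ++ [c] else acc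

def process_characters_alt (name : String) (first_letter_code : String) : List String :=
  let codes := name.toList.tail.map get_soundex_code          -- name[1:]
  let filtered := codes.filter (fun c => c ≠ "0")
  let collapsed := filtered.foldl collapseStep [first_letter_code]
  PySem.List.slice collapsed (some 1) (some 4)                -- collapsed[1:4]

-- ===== PRECONDITION & SPEC =====
def Spec_process_characters (name : String) (first_letter_code : String) (out : List String) : Prop := out = process_characters_alt name first_letter_code
instance (name : String) (first_letter_code : String) (out : List String) : Decidable (Spec_process_characters name first_letter_code out) := by unfold Spec_process_characters; infer_instance

-- ===== CLAIM (what is proved, stated in full; the proofs are below) =====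
def Claim_equal_process_characters : Prop := ∀ (name : String) (first_letter_code : String), Dom_process_characters name first_letter_code → Spec_process_characters name first_letter_code (process_characters name first_letter_code)

-- ===== LEMMAS AND PROOFS =====

-- functional view of B's collapse loop: collapseFrom prev l = the keys groupby would emit after seed prev
def collapseFrom : String → List String → List String
  | _, [] => []
  | prev, c :: rest => if c = prev then collapseFrom prev rest else c :: collapseFrom c rest

lemma gsc_ne_empty (c : Char) : get_soundex_code c ≠ "" := by
  unfold get_soundex_code
  dsimp only
  split_ifs <;> decide

lemma foldl_collapseStep (l : List String) : ∀ (sx : List String) (p : String),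
    l.foldl collapseStep (sx ++ [p]) = (sx ++ [p]) ++ collapseFrom p l := by
  induction l with
  | nil => intro sx p; simp [collapseFrom]
  | cons c rest ih =>
    intro sx p
    have hl : (sx ++ [p]).getLast! = p := by simp
    simp only [List.foldl_cons, collapseStep, collapseFrom, hl]
    by_cases h : c = p
    · simp [h, ih]
    · rw [if_pos (by simpa using h), if_neg h]
      have h2 := ih (sx ++ [p]) c
      simp only [List.append_assoc] at h2 ⊢
      simpa using h2

-- B's pipeline, closed form
lemma alt_eq (name first : String) :
    process_characters_alt name first =
      (collapseFrom first ((name.toList.tail.map get_soundex_code).filter (fun c => c ≠ "0"))).take 3 := by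
  unfold process_characters_alt
  dsimp only
  have h := foldl_collapseStep ((name.toList.tail.map get_soundex_code).filter (fun c => c ≠ "0")) [] first
  simp only [List.nil_append] at h
  rw [h]
  have h4 : PySem.List.slice ([first] ++ collapseFrom first ((name.toList.tail.map get_soundex_code).filter (fun c => c ≠ "0"))) (some ((1:Nat):Int)) (some ((4:Nat):Int)) =
      (([first] ++ collapseFrom first ((name.toList.tail.map get_soundex_code).filter (fun c => c ≠ "0"))).drop 1).take (4-1) :=
    PySem.List.slice_natCast _ 1 4
  simpa using h4

-- A's loop, related to B's closed form: the break at 3 is `take (3 - |sx|)` of the collapsed tail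
lemma loop_eq (chars : List Char) : ∀ (sx : List String) (prev : String), sx.length < 3 →
    pcLoop chars sx prev = sx ++ (collapseFrom prev ((chars.map get_soundex_code).filter (fun c => c ≠ "0"))).take (3 - sx.length) := by
  induction chars with
  | nil => intro sx prev _; simp [pcLoop, collapseFrom]
  | cons ch rest ih =>
    intro sx prev hlen
    have hne3 : ¬ sx.length = 3 := Nat.ne_of_lt hlen
    by_cases h0 : get_soundex_code ch = "0"
    · -- '0' code: A appends nothing and keeps prev_code; B's filter drops it
      have hpc : process_character ch prev = ("", prev) := by
        simp [process_character, should_add_code, h0]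
      simp only [pcLoop, hpc, List.map_cons, List.filter_cons, ne_eq, not_true_eq_false,
        if_false, if_neg hne3, h0, decide_false]
      simpa only [ne_eq, decide_not] using ih sx prev hlen
    · by_cases hp : get_soundex_code ch = prev
      · -- duplicate of prev_code: A skips it; B's collapse merges it
        have hpc : process_character ch prev = ("", prev) := by
          simp [process_character, should_add_code, hp]
        simp only [pcLoop, hpc, List.map_cons, List.filter_cons, ne_eq, not_true_eq_false,
          if_false, if_neg hne3, h0, decide_not, decide_false, Bool.not_false, if_true,
          collapseFrom, if_pos hp]
        simpa only [ne_eq, decide_not] using ih sx prev hlen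
      · -- fresh code: both append it
        have hpc : process_character ch prev = (get_soundex_code ch, get_soundex_code ch) := by
          simp [process_character, should_add_code, h0, hp]
        simp only [pcLoop, hpc, List.map_cons, List.filter_cons, ne_eq, h0, decide_not,
          decide_false, Bool.not_false, if_true, collapseFrom, if_neg hp,
          if_pos (gsc_ne_empty ch)]
        by_cases h3 : (sx ++ [get_soundex_code ch]).length = 3
        · rw [if_pos h3]
          have h2 : 3 - sx.length = 1 := by simp at h3; omega
          simp [h2]
        · rw [if_neg h3]
          have hlt : (sx ++ [get_soundex_code ch]).length < 3 := by
            simp at h3 ⊢; omega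
          rw [ih _ (get_soundex_code ch) hlt]
          have h2 : 3 - sx.length = (3 - (sx ++ [get_soundex_code ch]).length) + 1 := by
            simp; omega
          rw [h2, List.take_succ_cons]
          simp

-- ===== VERDICT (by name: the statement is the Claim_ definition above) =====
theorem process_characters_spec : Claim_equal_process_characters := by
  intro name first _
  unfold Spec_process_characters process_characters
  rw [alt_eq, loop_eq name.toList.tail [] first (by simp)]
  simp
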